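-- pv_equiv track=rewrite | github.com/Blackgaurd/Competitive-Programming | DMOJ/CCC/AliceThroughTheLookingGlass.py | check
-- ===== SOURCE A (Python) =====
-- def check(m, x, y) -> bool:
--     a = pow(5, m-1)
--
--     if a < x <= 4*a and y <= 2*a:
--         if y <= a:
--             return True
--
--         if 2*a < x <= 3*a:
--             return True
--
--         if m > 1:
--             if x > 3*a:
--                 return check(m-1, x-3*a, y-a)
--
--             return check(m-1, x-a, y-a)
--
--     elif m > 1 and 2*a < x <= 3*a and 2*a < y <= 3*a:
--         return check(m-1, x-2*a, y-2*a)
--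
--     return False
-- ===== SOURCE B (Python) =====
-- def check(m, x, y) -> bool:
--     # Digit-peeling: work on zero-based coordinates (u, v) = (x-1, y-1) and at
--     # each level classify the point by its base-5 "digit" pair (u//a, v//a),
--     # reducing the coordinates with divmod instead of comparing x, y against
--     # multiples of a.  Depth m <= 0 has no fractal, hence False.
--     if m <= 0:
--         return False
--     u, v = x - 1, y - 1
--     a = 5 ** (m - 1)
--     for level in range(m, 0, -1):
--         qx, u = divmod(u, a)
--         qy, v = divmod(v, a)
--         if 1 <= qx <= 3 and qy <= 1:
--             if qy <= 0 or qx == 2: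
--                 return True
--             if level == 1:
--                 return False
--         elif level > 1 and qx == 2 and qy == 2:
--             pass
--         else:
--             return False
--         a //= 5
--     return False
-- ===== Notes on version B (the rewrite author's own statement) =====
-- stated objective: alternative
-- what changed: Replaces A's recursion that compares x,y against multiples of a=5**(m-1) and subtracts them by an iterative base-5 digit-peeling loop: on zero-based coordinates (x-1, y-1) each level classifies the point by the digit pair (u//a, v//a) obtained with divmod, which also reduces the coordinates to their remainders; m<=0 (no fractal) returns False up front instead of via float-pow comparisons.
import Mathlib
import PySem

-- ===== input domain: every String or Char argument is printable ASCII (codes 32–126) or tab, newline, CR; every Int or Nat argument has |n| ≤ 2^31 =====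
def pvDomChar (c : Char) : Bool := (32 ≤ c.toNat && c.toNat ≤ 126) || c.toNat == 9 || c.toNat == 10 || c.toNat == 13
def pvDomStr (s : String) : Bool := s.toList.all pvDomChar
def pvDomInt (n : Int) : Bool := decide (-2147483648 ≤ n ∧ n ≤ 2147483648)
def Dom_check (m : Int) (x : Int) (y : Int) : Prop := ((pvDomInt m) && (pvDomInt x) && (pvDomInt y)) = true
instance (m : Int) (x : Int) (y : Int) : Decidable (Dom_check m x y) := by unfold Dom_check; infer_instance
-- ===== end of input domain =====

-- B replaces A's comparison-against-multiples recursion by a base-5 digit-peeling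
-- loop on zero-based coordinates via divmod (objective: alternative decomposition).
-- Python's pow(5, m-1) is an exact int for m ≥ 1 and a float in (0, 0.2] for m ≤ 0;
-- port A models it exactly with the rational (5:ℚ)^(m-1): for m ≤ 0 every
-- comparison against the integer arguments decides the same way as against the
-- float, since the interval (a, 4a] ⊆ (0, 1) contains no integer either way.

-- ===== PORT A =====
def check (m : Int) (x : Int) (y : Int) : Bool :=
  let a : ℚ := (5 : ℚ) ^ (m - 1)
  if a < (x : ℚ) ∧ (x : ℚ) ≤ 4 * a ∧ (y : ℚ) ≤ 2 * a then
    if (y : ℚ) ≤ a then true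
    else if 2 * a < (x : ℚ) ∧ (x : ℚ) ≤ 3 * a then true
    else if _h : 1 < m then
      -- in this branch a is Python's int 5**(m-1); ai is that integer
      let ai : Int := 5 ^ (m - 1).toNat
      if 3 * a < (x : ℚ) then check (m - 1) (x - 3 * ai) (y - ai)
      else check (m - 1) (x - ai) (y - ai)
    else false
  else if h : 1 < m ∧ 2 * a < (x : ℚ) ∧ (x : ℚ) ≤ 3 * a ∧ 2 * a < (y : ℚ) ∧ (y : ℚ) ≤ 3 * a then
    let ai : Int := 5 ^ (m - 1).toNat
    check (m - 1) (x - 2 * ai) (y - 2 * ai)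
  else false
termination_by m.toNat
decreasing_by all_goals omega

-- ===== PORT B =====
-- the for-loop of Source B over level = m, m-1, …, 1, with state (u, v, a);
-- divmod is PySem.Int.floordiv / PySem.Int.mod (Python floor semantics)
def digitLoop (level : Int) (u : Int) (v : Int) (a : Int) : Bool :=
  if _h : level ≤ 0 then false          -- the for-loop is exhausted
  else
    let qx := PySem.Int.floordiv u a
    let u' := PySem.Int.mod u a
    let qy := PySem.Int.floordiv v a
    let v' := PySem.Int.mod v a
    if 1 ≤ qx ∧ qx ≤ 3 ∧ qy ≤ 1 then
      if qy ≤ 0 ∨ qx = 2 then true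
      else if level = 1 then false
      else digitLoop (level - 1) u' v' (PySem.Int.floordiv a 5)
    else if 1 < level ∧ qx = 2 ∧ qy = 2 then
      digitLoop (level - 1) u' v' (PySem.Int.floordiv a 5)
    else false
termination_by level.toNat
decreasing_by all_goals omega

def check_alt (m : Int) (x : Int) (y : Int) : Bool :=
  if m ≤ 0 then false
  else digitLoop m (x - 1) (y - 1) (5 ^ (m - 1).toNat)

-- ===== PRECONDITION & SPEC =====
def Spec_check (m : Int) (x : Int) (y : Int) (out : Bool) : Prop := out = check_alt m x y
instance (m : Int) (x : Int) (y : Int) (out : Bool) : Decidable (Spec_check m x y out) := by unfold Spec_check; infer_instance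

-- ===== CLAIM (what is proved, stated in full; the proofs are below) =====
def Claim_equal_check : Prop := ∀ (m : Int) (x : Int) (y : Int), Dom_check m x y → Spec_check m x y (check m x y)

-- ===== LEMMAS AND PROOFS =====

-- for m ≥ 1 the rational 5^(m-1) is the integer 5^(m-1)
lemma pow_cast_int (m : Int) (h : 1 ≤ m) :
    (5 : ℚ) ^ (m - 1) = ((5 ^ (m - 1).toNat : Int) : ℚ) := by
  obtain ⟨k, hk⟩ : ∃ k : ℕ, m - 1 = (k : Int) := ⟨(m - 1).toNat, by omega⟩
  rw [hk, zpow_natCast, Int.toNat_natCast]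
  push_cast
  ring

-- for m ≤ 0 the rational 5^(m-1) lies in (0, 1/5], so A's guards all fail
lemma check_nonpos (m x y : Int) (hm : m ≤ 0) : check m x y = false := by
  rw [check]
  have h0 : (0 : ℚ) < (5 : ℚ) ^ (m - 1) := by positivity
  have h5 : (5 : ℚ) ^ (m - 1) ≤ (5 : ℚ) ^ (-1 : Int) := by
    apply zpow_le_zpow_right₀ (by norm_num) (by omega)
  have hlt : (5 : ℚ) ^ (m - 1) ≤ 1 / 5 := by
    rw [zpow_neg_one] at h5; norm_num at h5 ⊢; linarith
  have hc1 : ¬ ((5 : ℚ) ^ (m - 1) < (x : ℚ) ∧ (x : ℚ) ≤ 4 * (5 : ℚ) ^ (m - 1) ∧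
      (y : ℚ) ≤ 2 * (5 : ℚ) ^ (m - 1)) := by
    rintro ⟨ha, hb, -⟩
    have hx0 : (0 : Int) < x := by exact_mod_cast h0.trans ha
    have hx1 : (1 : ℚ) ≤ (x : ℚ) := by exact_mod_cast hx0
    linarith
  have hm1 : ¬ (1 < m) := by omega
  simp [hc1, hm1]

lemma main_eq (n : ℕ) : ∀ (m x y : Int), 1 ≤ m → m.toNat ≤ n →
    check m x y = digitLoop m (x - 1) (y - 1) (5 ^ (m - 1).toNat) := by
  induction n with
  | zero => intro m x y hm hn; omega
  | succ n ih =>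
    intro m x y hm hn
    set ai : Int := 5 ^ (m - 1).toNat with hai_def
    have hai : (0 : Int) < ai := by positivity
    have hcast : (5 : ℚ) ^ (m - 1) = ((ai : Int) : ℚ) := pow_cast_int m hm
    set qx := PySem.Int.floordiv (x - 1) ai with hqx
    set qy := PySem.Int.floordiv (y - 1) ai with hqy
    -- atomic condition translations
    have e1 : (5 : ℚ) ^ (m - 1) < (x : ℚ) ↔ 1 ≤ qx := by
      rw [hcast, hqx, PySem.Int.le_floordiv_iff_mul_le hai]
      constructor
      · intro h; have h' : ai < x := by exact_mod_cast h
        omega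
      · intro h; exact_mod_cast (by omega : ai < x)
    have e2 : (x : ℚ) ≤ 4 * (5 : ℚ) ^ (m - 1) ↔ qx ≤ 3 := by
      rw [hcast, hqx, show (qx ≤ 3 ↔ qx < 4) by omega, hqx,
        PySem.Int.floordiv_lt_iff_lt_mul hai]
      constructor
      · intro h; have h' : x ≤ 4 * ai := by exact_mod_cast h
        omega
      · intro h; exact_mod_cast (by omega : x ≤ 4 * ai)
    have e3 : (y : ℚ) ≤ 2 * (5 : ℚ) ^ (m - 1) ↔ qy ≤ 1 := by
      rw [hcast, hqy, show (qy ≤ 1 ↔ qy < 2) by omega, hqy,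
        PySem.Int.floordiv_lt_iff_lt_mul hai]
      constructor
      · intro h; have h' : y ≤ 2 * ai := by exact_mod_cast h
        omega
      · intro h; exact_mod_cast (by omega : y ≤ 2 * ai)
    have e4 : (y : ℚ) ≤ (5 : ℚ) ^ (m - 1) ↔ qy ≤ 0 := by
      rw [hcast, hqy, show (qy ≤ 0 ↔ qy < 1) by omega, hqy,
        PySem.Int.floordiv_lt_iff_lt_mul hai]
      constructor
      · intro h; have h' : y ≤ ai := by exact_mod_cast h
        omega
      · intro h; exact_mod_cast (by omega : y ≤ ai)
    have e5 : (2 * (5 : ℚ) ^ (m - 1) < (x : ℚ) ∧ (x : ℚ) ≤ 3 * (5 : ℚ) ^ (m - 1)) ↔ qx = 2 := by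
      rw [hcast, hqx, PySem.Int.floordiv_eq_iff_of_pos hai]
      constructor
      · rintro ⟨h1, h2⟩
        have hx1 : 2 * ai < x := by exact_mod_cast h1
        have hx2 : x ≤ 3 * ai := by exact_mod_cast h2
        omega
      · rintro ⟨h1, h2⟩
        constructor
        · exact_mod_cast (by omega : 2 * ai < x)
        · exact_mod_cast (by omega : x ≤ 3 * ai)
    have e6 : 3 * (5 : ℚ) ^ (m - 1) < (x : ℚ) ↔ 3 ≤ qx := by
      rw [hcast, hqx, PySem.Int.le_floordiv_iff_mul_le hai]
      constructor
      · intro h; have h' : 3 * ai < x := by exact_mod_cast h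
        omega
      · intro h; exact_mod_cast (by omega : 3 * ai < x)
    have e7 : (2 * (5 : ℚ) ^ (m - 1) < (y : ℚ) ∧ (y : ℚ) ≤ 3 * (5 : ℚ) ^ (m - 1)) ↔ qy = 2 := by
      rw [hcast, hqy, PySem.Int.floordiv_eq_iff_of_pos hai]
      constructor
      · rintro ⟨h1, h2⟩
        have hy1 : 2 * ai < y := by exact_mod_cast h1
        have hy2 : y ≤ 3 * ai := by exact_mod_cast h2
        omega
      · rintro ⟨h1, h2⟩
        constructor
        · exact_mod_cast (by omega : 2 * ai < y)
        · exact_mod_cast (by omega : y ≤ 3 * ai)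
    -- the remainders
    have hmx : PySem.Int.mod (x - 1) ai = (x - 1) - qx * ai := by
      have := PySem.Int.floordiv_mul_add_mod (x - 1) ai; rw [← hqx] at this; linarith
    have hmy : PySem.Int.mod (y - 1) ai = (y - 1) - qy * ai := by
      have := PySem.Int.floordiv_mul_add_mod (y - 1) ai; rw [← hqy] at this; linarith
    -- the next power
    have hnext : 1 < m → PySem.Int.floordiv ai 5 = 5 ^ (m - 1 - 1).toNat := by
      intro h1m
      rw [PySem.Int.floordiv_eq_ediv_of_pos (by norm_num), hai_def,
        show (m - 1).toNat = (m - 1 - 1).toNat + 1 by omega, pow_succ]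
      exact Int.mul_ediv_cancel _ (by norm_num)
    have hmm : ¬ (m ≤ 0) := by omega
    rw [check, digitLoop]
    simp only [hmm, dite_false, ← hqx, ← hqy]
    by_cases c1 : (5 : ℚ) ^ (m - 1) < (x : ℚ) ∧ (x : ℚ) ≤ 4 * (5 : ℚ) ^ (m - 1) ∧
        (y : ℚ) ≤ 2 * (5 : ℚ) ^ (m - 1)
    · have c1' : 1 ≤ qx ∧ qx ≤ 3 ∧ qy ≤ 1 := by
        exact ⟨e1.mp c1.1, e2.mp c1.2.1, e3.mp c1.2.2⟩
      simp only [c1, c1']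
      by_cases c2 : (y : ℚ) ≤ (5 : ℚ) ^ (m - 1)
      · simp [c2, e4.mp c2]
      · have c2' : ¬ qy ≤ 0 := fun h => c2 (e4.mpr h)
        by_cases c3 : 2 * (5 : ℚ) ^ (m - 1) < (x : ℚ) ∧ (x : ℚ) ≤ 3 * (5 : ℚ) ^ (m - 1)
        · simp [c2, c3, c2', e5.mp c3]
        · have c3' : ¬ qx = 2 := fun h => c3 (e5.mpr h)
          simp only [c2, c3, if_false, c2', c3', or_false, if_false]
          by_cases hm1 : 1 < m
          · have hne1 : ¬ (m = 1) := by omega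
            simp only [hm1, dif_pos, hne1, if_false]
            by_cases c4 : 3 * (5 : ℚ) ^ (m - 1) < (x : ℚ)
            · have hq3 : qx = 3 := by have := e6.mp c4; omega
              simp only [c4, if_true]
              rw [ih (m - 1) (x - 3 * ai) (y - ai) (by omega) (by omega),
                hnext hm1, hmx, hmy, hq3]
              have hqy1 : qy = 1 := by omega
              rw [hqy1]; ring_nf; simp
            · have hq3 : qx = 1 := by
                have : ¬ 3 ≤ qx := fun h => c4 (e6.mpr h); omega
              simp only [c4, if_false]
              rw [ih (m - 1) (x - ai) (y - ai) (by omega) (by omega),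
                hnext hm1, hmx, hmy, hq3]
              have hqy1 : qy = 1 := by omega
              rw [hqy1]; ring_nf; simp
          · have hm1' : m = 1 := by omega
            simp [hm1']
    · have c1' : ¬ (1 ≤ qx ∧ qx ≤ 3 ∧ qy ≤ 1) := by
        intro ⟨h1, h2, h3⟩; exact c1 ⟨e1.mpr h1, e2.mpr h2, e3.mpr h3⟩
      simp only [c1, if_false, c1', if_false]
      by_cases c5 : 1 < m ∧ 2 * (5 : ℚ) ^ (m - 1) < (x : ℚ) ∧ (x : ℚ) ≤ 3 * (5 : ℚ) ^ (m - 1) ∧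
          2 * (5 : ℚ) ^ (m - 1) < (y : ℚ) ∧ (y : ℚ) ≤ 3 * (5 : ℚ) ^ (m - 1)
      · have hqx2 : qx = 2 := e5.mp ⟨c5.2.1, c5.2.2.1⟩
        have hqy2 : qy = 2 := e7.mp ⟨c5.2.2.2.1, c5.2.2.2.2⟩
        have hm1 : 1 < m := c5.1
        simp only [c5, dif_pos, hqx2, hqy2, and_self, if_true]
        rw [ih (m - 1) (x - 2 * ai) (y - 2 * ai) (by omega) (by omega),
          hnext hm1, hmx, hmy, hqx2, hqy2]
        ring_nf
      · have c5' : ¬ (1 < m ∧ qx = 2 ∧ qy = 2) := by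
          intro ⟨h1, h2, h3⟩
          exact c5 ⟨h1, (e5.mpr h2).1, (e5.mpr h2).2, (e7.mpr h3).1, (e7.mpr h3).2⟩
        simp [c5, c5']

-- ===== VERDICT (by name: the statement is the Claim_ definition above) =====
theorem check_spec : Claim_equal_check := by
  intro m x y _
  unfold Spec_check check_alt
  by_cases hm : m ≤ 0
  · simp [hm, check_nonpos m x y hm]
  · simp only [hm, if_false]
    exact main_eq m.toNat m x y (by omega) le_rfl
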